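-- pv_equiv track=rewrite | github.com/darshann25/ProblemSolving | leetcode/word_ladder.py | checkValidTransforms
-- ===== SOURCE A (Python) =====
-- from typing import List
--
-- def checkValidTransforms(word: str, wordList: List[str]):
--
--     transforms = []
--
--     for currWord in wordList:
--         wordDiff = 0
--         for i in range(len(word)):
--             if word[i] != currWord[i]:
--                 wordDiff += 1
--                 if wordDiff > 1:
--                     break
--
--         if wordDiff == 1:
--             transforms.append(currWord)
--
--     updatedWordList = [x for x in wordList if x not in transforms]
--     return transforms, updatedWordList
-- ===== SOURCE B (Python) =====
-- def checkValidTransforms(word, wordList):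
--     transforms = []
--     updatedWordList = []
--     for currWord in wordList:
--         wordDiff = 0
--         for i in range(len(word)):
--             if word[i] != currWord[i]:
--                 wordDiff += 1
--                 if wordDiff > 1:
--                     break
--         if wordDiff == 1:
--             transforms.append(currWord)
--         else:
--             updatedWordList.append(currWord)
--     return transforms, updatedWordList
-- ===== Notes on version B (the rewrite author's own statement) =====
-- stated objective: simpler
-- what changed: B classifies each word in a single pass, appending to transforms or updatedWordList directly, instead of A's collect-then-filter with an O(n*t) membership scan over transforms.
import Mathlib
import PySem

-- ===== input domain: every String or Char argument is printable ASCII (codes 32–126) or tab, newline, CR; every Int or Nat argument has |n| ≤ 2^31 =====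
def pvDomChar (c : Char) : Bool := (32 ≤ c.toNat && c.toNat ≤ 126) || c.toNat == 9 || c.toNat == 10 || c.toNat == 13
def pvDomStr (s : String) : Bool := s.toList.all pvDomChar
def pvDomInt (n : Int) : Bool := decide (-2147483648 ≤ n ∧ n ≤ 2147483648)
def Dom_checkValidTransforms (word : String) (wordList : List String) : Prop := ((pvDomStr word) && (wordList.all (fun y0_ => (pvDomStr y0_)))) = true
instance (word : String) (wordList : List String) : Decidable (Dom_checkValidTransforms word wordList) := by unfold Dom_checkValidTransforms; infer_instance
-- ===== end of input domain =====

-- B replaces A's collect-then-filter (second membership-based comprehension) with a single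
-- pass that appends each word to one of two lists; same inner diff loop, same values.


-- ===== PORT A =====
-- Inner diff loop, identical character for character in A and in B (both Pythons share it):
-- for i in range(len(word)): if word[i] != currWord[i]: wordDiff += 1; if wordDiff > 1: break
-- When currWord[i] is out of range Python raises IndexError (excluded by Pre_); the port
-- returns the current count there to stay total.
def wordDiffLoop (w c : List Char) (i : Nat) (d : Int) : Int :=
  if h : i < w.length then
    if hc : i < c.length then
      if w.get ⟨i, h⟩ ≠ c.get ⟨i, hc⟩ then
        if d + 1 > 1 then d + 1
        else wordDiffLoop w c (i + 1) (d + 1)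
      else wordDiffLoop w c (i + 1) d
    else d               -- IndexError in Python here; outside Pre_

  else d
termination_by w.length - i

def checkValidTransforms (word : String) (wordList : List String) : List String × List String :=
  let transforms := wordList.foldl (fun acc currWord =>
      if wordDiffLoop word.toList currWord.toList 0 0 == 1 then acc ++ [currWord] else acc) []
  let updatedWordList := wordList.filter (fun x => !transforms.contains x)
  (transforms, updatedWordList)

-- ===== PORT B =====
def checkValidTransforms_altGo (word : List Char) : List String → List String × List String
  | [] => ([], [])
  | currWord :: rest =>
    let wordDiff := wordDiffLoop word currWord.toList 0 0
    let p := checkValidTransforms_altGo word rest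
    if wordDiff == 1 then (currWord :: p.1, p.2) else (p.1, currWord :: p.2)

def checkValidTransforms_alt (word : String) (wordList : List String) : List String × List String :=
  checkValidTransforms_altGo word.toList wordList

-- ===== PRECONDITION & SPEC =====
-- Pre_ excludes exactly the inputs on which the Python raises IndexError: a list word shorter
-- than `word` whose prefix shows fewer than two mismatches (so the inner loop's break does not
-- stop the scan before the out-of-range index).
def Pre_checkValidTransforms (word : String) (wordList : List String) : Prop :=
  ∀ w ∈ wordList, word.toList.length ≤ w.toList.length ∨
    2 ≤ ((word.toList.zip w.toList).countP (fun p => p.1 ≠ p.2))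
instance (word : String) (wordList : List String) : Decidable (Pre_checkValidTransforms word wordList) := by unfold Pre_checkValidTransforms; infer_instance
def pvWitness_checkValidTransforms : String × List String := ("ab", ["aa", "bb", "ab", "cab"])

def Spec_checkValidTransforms (word : String) (wordList : List String) (out : List String × List String) : Prop := out = checkValidTransforms_alt word wordList
instance (word : String) (wordList : List String) (out : List String × List String) : Decidable (Spec_checkValidTransforms word wordList out) := by unfold Spec_checkValidTransforms; infer_instance

-- ===== CLAIM (what is proved, stated in full; the proofs are below) =====
def Claim_equal_checkValidTransforms : Prop := ∀ (word : String) (wordList : List String), Dom_checkValidTransforms word wordList → Pre_checkValidTransforms word wordList → Spec_checkValidTransforms word wordList (checkValidTransforms word wordList)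

-- ===== LEMMAS AND PROOFS =====

-- A's outer loop is filtering by "diff count equals 1".
theorem foldl_transforms (word : List Char) (l : List String) (acc : List String) :
    l.foldl (fun acc currWord =>
      if wordDiffLoop word currWord.toList 0 0 == 1 then acc ++ [currWord] else acc) acc
    = acc ++ l.filter (fun cw => wordDiffLoop word cw.toList 0 0 == 1) := by
  induction l generalizing acc with
  | nil => simp
  | cons x xs ih =>
    rw [List.foldl_cons, List.filter_cons]
    by_cases h : (wordDiffLoop word x.toList 0 0 == 1) = true
    · rw [if_pos h, ih, if_pos h]; simp
    · rw [if_neg h, ih, if_neg h]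

-- B's single pass splits the list into the two filters.
theorem altGo_eq_filters (word : List Char) (l : List String) :
    checkValidTransforms_altGo word l
      = (l.filter (fun cw => wordDiffLoop word cw.toList 0 0 == 1),
         l.filter (fun cw => !(wordDiffLoop word cw.toList 0 0 == 1))) := by
  induction l with
  | nil => rfl
  | cons x xs ih =>
    simp only [checkValidTransforms_altGo, ih, List.filter_cons]
    by_cases h : wordDiffLoop word x.toList 0 0 == 1 <;> simp [h]

-- "x not in transforms", for x drawn from wordList itself, is "diff x ≠ 1".
theorem filter_not_mem_filter (word : List Char) (l : List String) :
    l.filter (fun x => !(l.filter (fun cw => wordDiffLoop word cw.toList 0 0 == 1)).contains x)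
      = l.filter (fun cw => !(wordDiffLoop word cw.toList 0 0 == 1)) := by
  apply List.filter_congr
  intro x hx
  by_cases h : wordDiffLoop word x.toList 0 0 == 1 <;>
    simp [List.mem_filter, hx, h]

-- ===== VERDICT (by name: the statement is the Claim_ definition above) =====
theorem checkValidTransforms_spec : Claim_equal_checkValidTransforms := by
  intro word wordList _ _
  unfold Spec_checkValidTransforms checkValidTransforms checkValidTransforms_alt
  simp only [foldl_transforms, List.nil_append, filter_not_mem_filter, altGo_eq_filters]
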